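-- pv_equiv track=rewrite | github.com/RevansChen/online-judge | Codewars/5kyu/simple-css-selector-comparison/Python/solutions1.py | calcWeight
-- ===== SOURCE A (Python) =====
-- def calcWeight(ss):
--     for ch in ['.', '#']:
--         ss = ss.replace(ch, ' ' + ch)
--     ss = ss.strip(' ')
--
--     id, cs, tag = 0, 0, 0
--     if ss != '*':
--         for selector in ss.split(' '):
--             if len(selector):
--                 if selector.startswith('.'):
--                     cs += 1
--                 elif selector.startswith('#'):
--                     id += 1
--                 else:
--                     tag += 1
--     return (id, cs, tag)
-- ===== SOURCE B (Python) =====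
-- def calcWeight(ss):
--     # single pass with a previous-character state instead of replace/strip/split token machinery
--     if ss.strip(' ') == '*':
--         return (0, 0, 0)
--     tag, prev = 0, ' '
--     for c in ss:
--         if c not in ' .#' and prev == ' ':
--             tag += 1
--         prev = c
--     return (ss.count('#'), ss.count('.'), tag)
-- ===== Notes on version B (the rewrite author's own statement) =====
-- stated objective: simpler
-- what changed: Replaces A's rebuild-the-string pipeline (two str.replace passes, strip, split(' '), token-prefix classification loop) with one direct pass over the original string: '#' and '.' counts are plain character counts and tags are counted by a previous-character token-start test.
import Mathlib
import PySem

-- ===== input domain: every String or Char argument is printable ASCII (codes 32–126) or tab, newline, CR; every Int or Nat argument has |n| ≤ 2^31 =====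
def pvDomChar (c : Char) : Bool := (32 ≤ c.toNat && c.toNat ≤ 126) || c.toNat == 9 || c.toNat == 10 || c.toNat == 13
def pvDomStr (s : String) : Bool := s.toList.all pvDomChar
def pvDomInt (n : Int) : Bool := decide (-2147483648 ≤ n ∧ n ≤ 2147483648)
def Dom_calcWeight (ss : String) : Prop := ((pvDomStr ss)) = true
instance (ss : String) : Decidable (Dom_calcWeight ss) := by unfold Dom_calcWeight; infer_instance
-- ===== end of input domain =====

-- B replaces A's replace/strip/split token pipeline by one previous-character scan plus two
-- character counts (objective: simpler single pass; not measured faster).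

-- ===== PORT A =====
-- literal transliteration of A: two replaces, strip(' '), then a fold over split(' ')
def calcWeight (ss : String) : Int × Int × Int :=
  let s1 := PySem.Chars.replace ss.toList ['.'] [' ', '.']
  let s2 := PySem.Chars.replace s1 ['#'] [' ', '#']
  let s3 := PySem.Chars.stripChars s2 [' ']
  if s3 ≠ ['*'] then
    ((PySem.Chars.split? s3 [' ']).getD []).foldl
      (fun (acc : Int × Int × Int) sel =>
        if sel.length ≠ 0 then
          if PySem.Chars.startswith sel ['.'] then (acc.1, acc.2.1 + 1, acc.2.2)
          else if PySem.Chars.startswith sel ['#'] then (acc.1 + 1, acc.2.1, acc.2.2)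
          else (acc.1, acc.2.1, acc.2.2 + 1)
        else acc) ((0 : Int), (0 : Int), (0 : Int))
  else (0, 0, 0)

-- ===== PORT B =====
-- the "for c in ss" loop of Source B, carrying (prev, tag)
def altTag : List Char → Char → Int → Int
  | [], _, t => t
  | c :: r, prev, t =>
      altTag r c (if (c ≠ ' ' ∧ c ≠ '.' ∧ c ≠ '#') ∧ prev = ' ' then t + 1 else t)

def calcWeight_alt (ss : String) : Int × Int × Int :=
  let l := ss.toList
  if PySem.Chars.stripChars l [' '] = ['*'] then (0, 0, 0)
  else ((PySem.Chars.count l ['#'] : Int), (PySem.Chars.count l ['.'] : Int), altTag l ' ' 0)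

-- ===== PRECONDITION & SPEC =====
def Spec_calcWeight (ss : String) (out : Int × Int × Int) : Prop := out = calcWeight_alt ss
instance (ss : String) (out : Int × Int × Int) : Decidable (Spec_calcWeight ss out) := by unfold Spec_calcWeight; infer_instance

-- ===== CLAIM (what is proved, stated in full; the proofs are below) =====
def Claim_equal_calcWeight : Prop := ∀ (ss : String), Dom_calcWeight ss → Spec_calcWeight ss (calcWeight ss)

-- ===== LEMMAS AND PROOFS =====

-- the character map performed by A's two replaces
def pvG (c : Char) : List Char :=
  if c = '.' then [' ', '.'] else if c = '#' then [' ', '#'] else [c]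

-- split on a single char, as (first token, remaining tokens)
def pvSplit : List Char → List Char × List (List Char)
  | [] => ([], [])
  | x :: xs =>
      let p := pvSplit xs
      if x = ' ' then ([], p.1 :: p.2) else (x :: p.1, p.2)

-- one step of A's token-classifying fold
def pvStep (acc : Int × Int × Int) (sel : List Char) : Int × Int × Int :=
  if sel.length ≠ 0 then
    if PySem.Chars.startswith sel ['.'] then (acc.1, acc.2.1 + 1, acc.2.2)
    else if PySem.Chars.startswith sel ['#'] then (acc.1 + 1, acc.2.1, acc.2.2)
    else (acc.1, acc.2.1, acc.2.2 + 1)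
  else acc

def pvBump (c : Char) (acc : Int × Int × Int) : Int × Int × Int :=
  if c = '.' then (acc.1, acc.2.1 + 1, acc.2.2)
  else if c = '#' then (acc.1 + 1, acc.2.1, acc.2.2)
  else (acc.1, acc.2.1, acc.2.2 + 1)

-- A's token fold re-read as a left-to-right scan with an "inside a token" flag
def pvScan : List Char → Bool → (Int × Int × Int) → Int × Int × Int
  | [], _, acc => acc
  | c :: r, ins, acc =>
      if c = ' ' then pvScan r false acc
      else if ins then pvScan r true acc
      else pvScan r true (pvBump c acc)

theorem pv_replace_go_single (c : Char) (new : List Char) :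
    ∀ (l : List Char) (fuel : Nat) (acc : List Char), l.length ≤ fuel →
      PySem.Chars.replace.go [c] new fuel l acc =
        acc.reverse ++ l.flatMap (fun x => if x = c then new else [x]) := by
  intro l
  induction l with
  | nil => intro fuel acc h; cases fuel <;> simp [PySem.Chars.replace.go]
  | cons x xs ih =>
    intro fuel acc h
    cases fuel with
    | zero => simp at h
    | succ f =>
      simp only [List.length_cons] at h
      by_cases hx : x = c
      · subst hx
        have hp : [x].isPrefixOf (x :: xs) = true := by simp [List.isPrefixOf]
        simp only [PySem.Chars.replace.go, hp, if_pos, List.length_cons, List.length_nil,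
          List.drop_succ_cons, List.drop_zero]
        rw [ih f _ (by omega)]
        simp
      · have hp : [c].isPrefixOf (x :: xs) = false := by
          simp [List.isPrefixOf]; exact fun h => absurd h.symm hx
        simp only [PySem.Chars.replace.go, hp]
        rw [ih f _ (by omega)]
        simp [hx]

theorem pv_replace_single (c : Char) (new : List Char) (l : List Char) :
    PySem.Chars.replace l [c] new = l.flatMap (fun x => if x = c then new else [x]) := by
  simp [PySem.Chars.replace, pv_replace_go_single c new l l.length [] le_rfl]

theorem pv_T_eq (l : List Char) :
    PySem.Chars.replace (PySem.Chars.replace l ['.'] [' ', '.']) ['#'] [' ', '#'] =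
      l.flatMap pvG := by
  rw [pv_replace_single, pv_replace_single, List.flatMap_assoc]
  refine List.flatMap_congr ?_
  intro x _
  by_cases h1 : x = '.'
  · subst h1; simp [pvG]
  · by_cases h2 : x = '#' <;> simp [pvG, h1, h2]

theorem pv_count_go_single (c : Char) :
    ∀ (l : List Char) (fuel : Nat) (acc : Nat), l.length ≤ fuel →
      PySem.Chars.count.go [c] fuel l acc = acc + l.count c := by
  intro l
  induction l with
  | nil => intro fuel acc h; cases fuel <;> simp [PySem.Chars.count.go]
  | cons x xs ih =>
    intro fuel acc h
    cases fuel with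
    | zero => simp at h
    | succ f =>
      simp only [List.length_cons] at h
      by_cases hx : x = c
      · subst hx
        have hp : [x].isPrefixOf (x :: xs) = true := by simp [List.isPrefixOf]
        simp only [PySem.Chars.count.go, hp, if_pos, List.length_cons, List.length_nil,
          List.drop_succ_cons, List.drop_zero]
        rw [ih f _ (by omega)]
        simp
        omega
      · have hp : [c].isPrefixOf (x :: xs) = false := by
          simp [List.isPrefixOf]; exact fun h => absurd h.symm hx
        simp only [PySem.Chars.count.go, hp, Bool.false_eq_true, if_false]
        rw [ih f _ (by omega)]
        simp [hx]

theorem pv_count_single (c : Char) (l : List Char) :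
    PySem.Chars.count l [c] = l.count c := by
  simp [PySem.Chars.count, pv_count_go_single c l l.length 0 le_rfl]

theorem pv_splitOn_go :
    ∀ (l : List Char) (fuel : Nat) (cur : List Char) (acc : List (List Char)), l.length ≤ fuel →
      PySem.Chars.splitOn.go [' '] fuel l cur acc =
        acc.reverse ++ (cur.reverse ++ (pvSplit l).1) :: (pvSplit l).2 := by
  intro l
  induction l with
  | nil => intro fuel cur acc h; cases fuel <;> simp [PySem.Chars.splitOn.go, pvSplit]
  | cons x xs ih =>
    intro fuel cur acc h
    cases fuel with
    | zero => simp at h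
    | succ f =>
      simp only [List.length_cons] at h
      by_cases hx : x = ' '
      · subst hx
        have hp : [' '].isPrefixOf (' ' :: xs) = true := by simp [List.isPrefixOf]
        simp only [PySem.Chars.splitOn.go, hp, if_pos, List.length_cons, List.length_nil,
          List.drop_succ_cons, List.drop_zero]
        rw [ih f _ _ (by omega)]
        simp [pvSplit]
      · have hp : [' '].isPrefixOf (x :: xs) = false := by
          simp [List.isPrefixOf]; exact fun h => absurd h.symm hx
        simp only [PySem.Chars.splitOn.go, hp, Bool.false_eq_true, if_false]
        rw [ih f _ _ (by omega)]
        simp [pvSplit, hx]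

theorem pv_splitOn_space (l : List Char) :
    PySem.Chars.splitOn l [' '] = (pvSplit l).1 :: (pvSplit l).2 := by
  simpa using pv_splitOn_go l (l.length + 1) [] [] (by omega)

theorem pv_step_eq (p : List Char) (acc : Int × Int × Int) :
    pvStep acc p = if h : p = [] then acc else pvBump (p.head h) acc := by
  cases p with
  | nil => simp [pvStep]
  | cons a q =>
    simp only [pvStep, pvBump, PySem.Chars.startswith, List.isPrefixOf, List.length_cons]
    by_cases h1 : a = '.'
    · simp_all
    · by_cases h2 : a = '#'
      · simp_all
      · have h1' : ¬('.' = a) := fun h => h1 h.symm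
        have h2' : ¬('#' = a) := fun h => h2 h.symm
        simp_all

theorem pv_fold_split (u : List Char) :
    ∀ (p : List Char) (acc : Int × Int × Int),
      List.foldl pvStep acc ((p ++ (pvSplit u).1) :: (pvSplit u).2) =
      pvScan u (p ≠ []) (if h : p = [] then acc else pvBump (p.head h) acc) := by
  induction u with
  | nil =>
    intro p acc
    simp [pvSplit, pvScan, pv_step_eq]
  | cons x xs ih =>
    intro p acc
    by_cases hx : x = ' '
    · subst hx
      have e : pvSplit (' ' :: xs) = ([], (pvSplit xs).1 :: (pvSplit xs).2) := by
        simp [pvSplit]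
      rw [e]
      have lhs : List.foldl pvStep acc ((p ++ ([] : List Char)) :: (pvSplit xs).1 :: (pvSplit xs).2)
          = List.foldl pvStep (pvStep acc p) ((([] : List Char) ++ (pvSplit xs).1) :: (pvSplit xs).2) := by
        simp
      rw [lhs, ih [] (pvStep acc p)]
      simp [pvScan, pv_step_eq]
    · have e : pvSplit (x :: xs) = (x :: (pvSplit xs).1, (pvSplit xs).2) := by
        simp [pvSplit, hx]
      rw [e]
      have lhs : (p ++ x :: (pvSplit xs).1) = ((p ++ [x]) ++ (pvSplit xs).1) := by simp
      rw [show (p ++ (x :: (pvSplit xs).1, (pvSplit xs).2).1) = ((p ++ [x]) ++ (pvSplit xs).1) by simp]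
      rw [ih (p ++ [x]) acc]
      have hne : (p ++ [x]) ≠ [] := by simp
      cases p with
      | nil =>
        simp only [pvScan, hx, ne_eq]
        simp
      | cons a q =>
        have : (a :: q ++ [x]).head (by simp) = a := rfl
        simp [pvScan, hx]

theorem pv_scan_all_space_left (w v : List Char) (acc : Int × Int × Int)
    (h : ∀ x ∈ w, x = ' ') : pvScan (w ++ v) false acc = pvScan v false acc := by
  induction w with
  | nil => rfl
  | cons a w ih =>
    have ha : a = ' ' := h a (by simp)
    simp only [List.cons_append, pvScan, ha, if_pos]
    exact ih (fun x hx => h x (by simp [hx]))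

theorem pv_scan_all_space_nil (w : List Char) (h : ∀ x ∈ w, x = ' ') :
    ∀ (ins : Bool) (acc : Int × Int × Int), pvScan w ins acc = acc := by
  induction w with
  | nil => intro _ _; rfl
  | cons a w ih =>
    intro ins acc
    have ha : a = ' ' := h a (by simp)
    simp only [pvScan, ha, if_pos]
    exact ih (fun x hx => h x (by simp [hx])) false acc

theorem pv_scan_all_space_right (w : List Char) (h : ∀ x ∈ w, x = ' ') :
    ∀ (v : List Char) (ins : Bool) (acc : Int × Int × Int),
      pvScan (v ++ w) ins acc = pvScan v ins acc := by
  intro v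
  induction v with
  | nil => intro ins acc; simp [pvScan]; exact pv_scan_all_space_nil w h ins acc
  | cons a v ih =>
    intro ins acc
    by_cases ha : a = ' '
    · simp only [List.cons_append, pvScan, ha, if_pos]; exact ih false acc
    · by_cases hins : ins <;> simp only [List.cons_append, pvScan, ha, hins,
        Bool.false_eq_true, if_false, if_pos] <;> [exact ih true acc; exact ih true _]

theorem pv_scan_strip (u : List Char) (acc : Int × Int × Int) :
    pvScan (PySem.Chars.stripChars u [' ']) false acc = pvScan u false acc := by
  have hq : ∀ x : Char, (List.contains [' '] x) = true → x = ' ' := by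
    intro x hx; simpa using hx
  have right : ∀ v : List Char,
      pvScan ((List.dropWhile (fun c => List.contains [' '] c) v.reverse).reverse) false acc
        = pvScan v false acc := by
    intro v
    conv_rhs => rw [show v = (List.dropWhile (fun c => List.contains [' '] c) v.reverse).reverse
        ++ (List.takeWhile (fun c => List.contains [' '] c) v.reverse).reverse from by
      rw [← List.reverse_append, List.takeWhile_append_dropWhile, List.reverse_reverse]]
    exact (pv_scan_all_space_right _
      (fun x hx => hq x (List.mem_takeWhile_imp (List.mem_reverse.mp hx))) _ _ _).symm
  have left : pvScan (List.dropWhile (fun c => List.contains [' '] c) u) false acc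
      = pvScan u false acc := by
    conv_rhs => rw [show u = List.takeWhile (fun c => List.contains [' '] c) u
        ++ List.dropWhile (fun c => List.contains [' '] c) u from
      (List.takeWhile_append_dropWhile).symm]
    exact (pv_scan_all_space_left _ _ _
      (fun x hx => hq x (List.mem_takeWhile_imp hx))).symm
  calc pvScan (PySem.Chars.stripChars u [' ']) false acc
      = pvScan ((List.dropWhile (fun c => List.contains [' '] c)
          ((List.dropWhile (fun c => List.contains [' '] c) u).reverse)).reverse) false acc := rfl
    _ = pvScan (List.dropWhile (fun c => List.contains [' '] c) u) false acc := right _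
    _ = pvScan u false acc := left

theorem pv_mem_strip (u : List Char) (c : Char) (hc : c ≠ ' ') (h : c ∈ u) :
    c ∈ PySem.Chars.stripChars u [' '] := by
  unfold PySem.Chars.stripChars
  have key : ∀ (v : List Char), c ∈ v → c ∈ v.dropWhile (fun x => [' '].contains x) := by
    intro v hv
    induction v with
    | nil => simp at hv
    | cons a w ih =>
      by_cases ha : a = ' '
      · rw [List.dropWhile_cons_of_pos (by simp [ha])]
        rcases List.mem_cons.mp hv with h1 | h1
        · exact absurd (h1.trans ha) hc
        · exact ih h1
      · rw [List.dropWhile_cons_of_neg (by simp [ha])]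
        exact hv
  simp only [List.mem_reverse]
  exact key _ (by simp only [List.mem_reverse]; exact key _ h)

theorem pv_T_id (l : List Char) (h1 : '.' ∉ l) (h2 : '#' ∉ l) : l.flatMap pvG = l := by
  induction l with
  | nil => rfl
  | cons a w ih =>
    simp only [List.mem_cons, not_or] at h1 h2
    simp only [List.flatMap_cons, pvG, if_neg (Ne.symm (Ne.symm (by exact fun h => h1.1 h.symm)) : ¬a = '.')]
    rw [if_neg (fun h => h2.1 h.symm : ¬a = '#')]
    simp [ih h1.2 h2.2]

theorem pv_star_iff (l : List Char) :
    PySem.Chars.stripChars (l.flatMap pvG) [' '] = ['*'] ↔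
      PySem.Chars.stripChars l [' '] = ['*'] := by
  by_cases hd : '.' ∈ l
  · constructor <;> intro h <;> exfalso
    · have : ('.' : Char) ∈ PySem.Chars.stripChars (l.flatMap pvG) [' '] := by
        apply pv_mem_strip _ _ (by decide)
        exact List.mem_flatMap.mpr ⟨'.', hd, by simp [pvG]⟩
      rw [h] at this; simp at this
    · have : ('.' : Char) ∈ PySem.Chars.stripChars l [' '] :=
        pv_mem_strip _ _ (by decide) hd
      rw [h] at this; simp at this
  · by_cases hh : '#' ∈ l
    · constructor <;> intro h <;> exfalso
      · have : ('#' : Char) ∈ PySem.Chars.stripChars (l.flatMap pvG) [' '] := by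
          apply pv_mem_strip _ _ (by decide)
          exact List.mem_flatMap.mpr ⟨'#', hh, by simp [pvG]⟩
        rw [h] at this; simp at this
      · have : ('#' : Char) ∈ PySem.Chars.stripChars l [' '] :=
          pv_mem_strip _ _ (by decide) hh
        rw [h] at this; simp at this
    · rw [pv_T_id l hd hh]

theorem pv_altTag_congr (l : List Char) (p q : Char) (t : Int) (hp : p ≠ ' ') (hq : q ≠ ' ') :
    altTag l p t = altTag l q t := by
  cases l with
  | nil => rfl
  | cons c r => simp [altTag, hp, hq]

theorem pvScan_space (r : List Char) (ins : Bool) (acc : Int × Int × Int) :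
    pvScan (' ' :: r) ins acc = pvScan r false acc := by simp [pvScan]

theorem pvScan_nonspace (c : Char) (r : List Char) (ins : Bool) (acc : Int × Int × Int)
    (h : c ≠ ' ') : pvScan (c :: r) ins acc =
      if ins then pvScan r true acc else pvScan r true (pvBump c acc) := by
  simp [pvScan, h]

theorem pv_scan_main (l : List Char) :
    ∀ (ins : Bool) (i c t : Int),
      pvScan (l.flatMap pvG) ins (i, c, t) =
        (i + l.count '#', c + l.count '.', altTag l (if ins then '#' else ' ') t) := by
  induction l with
  | nil => intro ins i c t; cases ins <;> simp [pvScan, altTag]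
  | cons a r ih =>
    intro ins i c t
    by_cases h1 : a = '.'
    · subst h1
      rw [show List.flatMap pvG ('.' :: r) = ' ' :: '.' :: List.flatMap pvG r by simp [pvG]]
      rw [pvScan_space, pvScan_nonspace _ _ _ _ (by decide), if_neg (by simp)]
      rw [show pvBump '.' (i, c, t) = (i, c + 1, t) by simp [pvBump]]
      rw [ih true i (c + 1) t]
      rw [show ∀ pv, altTag ('.' :: r) pv t = altTag r '.' t from fun pv => by simp [altTag]]
      rw [show (if (true : Bool) = true then '#' else ' ') = '#' from rfl]
      rw [pv_altTag_congr r '#' '.' t (by decide) (by decide)]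
      simp [Prod.ext_iff]
      all_goals omega
    · by_cases h2 : a = '#'
      · subst h2
        rw [show List.flatMap pvG ('#' :: r) = ' ' :: '#' :: List.flatMap pvG r by simp [pvG]]
        rw [pvScan_space, pvScan_nonspace _ _ _ _ (by decide), if_neg (by simp)]
        rw [show pvBump '#' (i, c, t) = (i + 1, c, t) by simp [pvBump]]
        rw [ih true (i + 1) c t]
        rw [show ∀ pv, altTag ('#' :: r) pv t = altTag r '#' t from fun pv => by simp [altTag]]
        rw [show (if (true : Bool) = true then '#' else ' ') = '#' from rfl]
        simp [Prod.ext_iff]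
        all_goals omega
      · by_cases h3 : a = ' '
        · subst h3
          rw [show List.flatMap pvG (' ' :: r) = ' ' :: List.flatMap pvG r by simp [pvG]]
          rw [pvScan_space, ih false i c t]
          rw [show ∀ pv, altTag (' ' :: r) pv t = altTag r ' ' t from fun pv => by simp [altTag]]
          rw [show (if (false : Bool) = true then '#' else ' ') = ' ' from rfl]
          simp
        · rw [show List.flatMap pvG (a :: r) = a :: List.flatMap pvG r by simp [pvG, h1, h2]]
          rw [pvScan_nonspace _ _ _ _ h3]
          cases ins with
          | true =>
            rw [if_pos rfl, ih true i c t]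
            rw [show (if (true : Bool) = true then '#' else ' ') = '#' from rfl]
            rw [show altTag (a :: r) '#' t = altTag r a t by simp [altTag, h3, h1, h2]]
            rw [pv_altTag_congr r '#' a t (by decide) h3]
            simp [h1, h2]
          | false =>
            rw [if_neg (by simp)]
            rw [show pvBump a (i, c, t) = (i, c, t + 1) by
              simp [pvBump, h1, h2]]
            rw [ih true i c (t + 1)]
            rw [show (if (true : Bool) = true then '#' else ' ') = '#' from rfl]
            rw [show (if (false : Bool) = true then '#' else ' ') = ' ' from rfl]
            rw [show altTag (a :: r) ' ' t = altTag r a (t + 1) by simp [altTag, h3, h1, h2]]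
            rw [pv_altTag_congr r '#' a (t + 1) (by decide) h3]
            simp [h1, h2]


-- ===== VERDICT (by name: the statement is the Claim_ definition above) =====
theorem calcWeight_spec : Claim_equal_calcWeight := by
  intro ss _
  unfold Spec_calcWeight
  simp only [calcWeight, calcWeight_alt]
  rw [pv_T_eq]
  by_cases hstar : PySem.Chars.stripChars (ss.toList.flatMap pvG) [' '] = ['*']
  · rw [if_neg (by simpa using hstar), if_pos ((pv_star_iff _).mp hstar)]
  · rw [if_pos (by simpa using hstar)]
    rw [if_neg (fun h => hstar ((pv_star_iff _).mpr h))]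
    rw [show (PySem.Chars.split? (PySem.Chars.stripChars (ss.toList.flatMap pvG) [' ']) [' ']).getD []
        = PySem.Chars.splitOn (PySem.Chars.stripChars (ss.toList.flatMap pvG) [' ']) [' '] from by
      simp [PySem.Chars.split?]]
    rw [pv_splitOn_space]
    have hfold := pv_fold_split (PySem.Chars.stripChars (ss.toList.flatMap pvG) [' ']) [] (0, 0, 0)
    simp only [List.nil_append, ne_eq, not_true_eq_false, decide_false] at hfold
    rw [dif_pos trivial] at hfold
    change List.foldl pvStep ((0 : Int), (0 : Int), (0 : Int))
        ((pvSplit (PySem.Chars.stripChars (ss.toList.flatMap pvG) [' '])).1 ::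
          (pvSplit (PySem.Chars.stripChars (ss.toList.flatMap pvG) [' '])).2) = _
    rw [hfold, pv_scan_strip, pv_scan_main ss.toList false 0 0 0]
    rw [show (if (false : Bool) = true then '#' else ' ') = ' ' from rfl]
    rw [pv_count_single, pv_count_single]
    simp
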